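-- pv_equiv track=rewrite | github.com/PetarMarinov1991/Software-University | python_fundamentals/2_data_types_and_variables/3_more_exercise/4_balanced_brackets.py | check
-- ===== SOURCE A (Python) =====
-- def check(expression):
--     open_bracket, close_bracket = '(', ')'
--     # filtering only brackets in expression
--     brackets = [x for x in expression if x == open_bracket or x == close_bracket]
--     # dividing brackets to even and odd indexes in expression
--     even_brackets = [brackets[x] for x in range(len(brackets)) if x % 2 == 0]
--     odd_brackets = [brackets[x] for x in range(len(brackets)) if x % 2 != 0]
--
--     if len(even_brackets) == len(odd_brackets):
--         # close brackets must be odd index and open brackets even index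
--         if close_bracket not in even_brackets and open_bracket not in odd_brackets:
--             return 'BALANCED'
--     return 'UNBALANCED'
-- ===== SOURCE B (Python) =====
-- def check(expression):
--     s = ''.join(c for c in expression if c in '()')
--     return 'BALANCED' if s == '()' * (len(s) // 2) else 'UNBALANCED'
-- ===== Notes on version B (the rewrite author's own statement) =====
-- stated objective: simpler
-- what changed: Replaces the even/odd index split with membership tests by a single equality test of the filtered bracket string against the repeated open-close pair template.
import Mathlib
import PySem

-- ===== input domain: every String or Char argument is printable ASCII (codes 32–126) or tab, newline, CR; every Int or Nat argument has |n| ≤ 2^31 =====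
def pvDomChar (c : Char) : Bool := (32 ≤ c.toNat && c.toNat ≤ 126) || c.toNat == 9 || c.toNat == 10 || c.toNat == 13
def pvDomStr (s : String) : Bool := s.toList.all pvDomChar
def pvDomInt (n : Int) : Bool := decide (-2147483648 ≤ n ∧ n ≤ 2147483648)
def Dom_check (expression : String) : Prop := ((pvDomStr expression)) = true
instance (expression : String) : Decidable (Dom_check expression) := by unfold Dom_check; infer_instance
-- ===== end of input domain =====

-- B replaces A's even/odd index split and membership tests by one equality test of the
-- bracket string against the template "()" repeated len//2 times (objective: simpler).

-- ===== PORT A =====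
def check (expression : String) : String :=
  let open_bracket : Char := '('
  let close_bracket : Char := ')'
  let brackets := expression.toList.filter (fun x => x == '(' || x == ')')
  let even_brackets :=
    ((PySem.List.pyRange 0 (brackets.length : Int) 1).filter (fun x => x % 2 == 0)).map
      (fun x => PySem.List.pyGetD brackets x ' ')
  let odd_brackets :=
    ((PySem.List.pyRange 0 (brackets.length : Int) 1).filter (fun x => x % 2 != 0)).map
      (fun x => PySem.List.pyGetD brackets x ' ')
  if even_brackets.length = odd_brackets.length then
    if close_bracket ∉ even_brackets ∧ open_bracket ∉ odd_brackets then "BALANCED"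
    else "UNBALANCED"
  else "UNBALANCED"

-- ===== PORT B =====
def check_alt (expression : String) : String :=
  let s := expression.toList.filter (fun x => x == '(' || x == ')')
  if s = List.flatten (List.replicate (s.length / 2) ['(', ')']) then "BALANCED"
  else "UNBALANCED"

-- ===== PRECONDITION & SPEC =====
def Spec_check (expression : String) (out : String) : Prop := out = check_alt expression
instance (expression : String) (out : String) : Decidable (Spec_check expression out) := by unfold Spec_check; infer_instance

-- ===== CLAIM (what is proved, stated in full; the proofs are below) =====
def Claim_equal_check : Prop := ∀ (expression : String), Dom_check expression → Spec_check expression (check expression)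

-- ===== LEMMAS AND PROOFS =====

-- even-index / odd-index elements of a list, structurally
def evenIdx : List Char → List Char
  | [] => []
  | [a] => [a]
  | a :: _ :: t => a :: evenIdx t

def oddIdx : List Char → List Char
  | [] => []
  | [_] => []
  | _ :: b :: t => b :: oddIdx t

-- the Nat-range versions of A's comprehensions
lemma range_even_eq (l : List Char) :
    ((List.range l.length).filter (fun k => k % 2 == 0)).map (fun k => l.getD k ' ') = evenIdx l := by
  induction l using evenIdx.induct with
  | case1 => simp [evenIdx]
  | case2 a => simp [evenIdx]
  | case3 a b t ih =>
    show ((List.range (t.length + 1 + 1)).filter _).map _ = _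
    rw [List.range_succ_eq_map, List.range_succ_eq_map]
    simp only [List.map_cons, List.map_map, List.filter_cons, List.filter_map]
    norm_num [Function.comp_def, evenIdx]
    rw [← ih]
    simp only [List.getD_eq_getElem?_getD]
    congr 1
    apply List.filter_congr
    intro k _
    simp [Nat.add_assoc, Nat.add_mod_right]

lemma range_odd_eq (l : List Char) :
    ((List.range l.length).filter (fun k => k % 2 != 0)).map (fun k => l.getD k ' ') = oddIdx l := by
  induction l using oddIdx.induct with
  | case1 => simp [oddIdx]
  | case2 a => simp [oddIdx]
  | case3 a b t ih =>
    show ((List.range (t.length + 1 + 1)).filter _).map _ = _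
    rw [List.range_succ_eq_map, List.range_succ_eq_map]
    simp only [List.map_cons, List.map_map, List.filter_cons, List.filter_map]
    norm_num [Function.comp_def, oddIdx]
    rw [← ih]
    simp only [List.getD_eq_getElem?_getD]
    congr 1
    apply List.filter_congr
    intro k _
    simp [Nat.add_assoc, Nat.add_mod_right]

-- A's pyRange comprehensions reduce to the structural even/odd extraction
lemma pyrange_even_eq (l : List Char) :
    ((PySem.List.pyRange 0 (l.length : Int) 1).filter (fun x => x % 2 == 0)).map
      (fun x => PySem.List.pyGetD l x ' ') = evenIdx l := by
  rw [PySem.List.pyRange_zero_nat]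
  rw [← range_even_eq l]
  simp only [List.filter_map, List.map_map]
  congr 1
  · funext k
    simp
  · apply List.filter_congr
    intro k _
    simp only [Function.comp_apply]
    have h1 : (k : Int) % 2 = ((k % 2 : Nat) : Int) := by omega
    rw [h1]
    rcases Nat.mod_two_eq_zero_or_one k with h | h <;> simp [h]

lemma pyrange_odd_eq (l : List Char) :
    ((PySem.List.pyRange 0 (l.length : Int) 1).filter (fun x => x % 2 != 0)).map
      (fun x => PySem.List.pyGetD l x ' ') = oddIdx l := by
  rw [PySem.List.pyRange_zero_nat]
  rw [← range_odd_eq l]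
  simp only [List.filter_map, List.map_map]
  congr 1
  · funext k
    simp
  · apply List.filter_congr
    intro k _
    simp only [Function.comp_apply]
    have h1 : (k : Int) % 2 = ((k % 2 : Nat) : Int) := by omega
    rw [h1]
    rcases Nat.mod_two_eq_zero_or_one k with h | h <;> simp [h]

-- the template B compares against
def tmpl (n : Nat) : List Char := List.flatten (List.replicate n ['(', ')'])

-- core equivalence: A's condition iff l is the alternating template
lemma cond_iff_tmpl (l : List Char) (hb : ∀ c ∈ l, c = '(' ∨ c = ')') :
    ((evenIdx l).length = (oddIdx l).length ∧ ')' ∉ evenIdx l ∧ '(' ∉ oddIdx l) ↔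
      l = tmpl (l.length / 2) := by
  induction l using evenIdx.induct with
  | case1 => simp [evenIdx, oddIdx, tmpl]
  | case2 a => simp [evenIdx, oddIdx, tmpl]
  | case3 a b t ih =>
    have ha : a = '(' ∨ a = ')' := hb a (by simp)
    have hbb : b = '(' ∨ b = ')' := hb b (by simp)
    have ih' := ih (fun c hc => hb c (by simp [hc]))
    have hlen : (t.length + 1 + 1) / 2 = t.length / 2 + 1 := by omega
    simp only [evenIdx, oddIdx, List.length_cons, List.mem_cons, hlen, tmpl,
      List.replicate_succ, List.flatten_cons, List.cons_append, List.nil_append,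
      List.cons.injEq]
    rw [show (List.replicate (t.length / 2) ['(', ')']).flatten = tmpl (t.length / 2) from rfl]
    constructor
    · rintro ⟨h1, h2, h3⟩
      push_neg at h2 h3
      have ha' : a = '(' := ha.resolve_right (fun h => h2.1 h.symm)
      have hb' : b = ')' := hbb.resolve_left (fun h => h3.1 h.symm)
      exact ⟨ha', hb', ih'.mp ⟨by omega, h2.2, h3.2⟩⟩
    · rintro ⟨h1, h2, h3⟩
      have h4 := ih'.mpr h3
      refine ⟨by omega, ?_, ?_⟩
      · push_neg
        exact ⟨by simp [h1], h4.2.1⟩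
      · push_neg
        exact ⟨by simp [h2], h4.2.2⟩

-- ===== VERDICT (by name: the statement is the Claim_ definition above) =====
theorem check_spec : Claim_equal_check := by
  intro expression _
  show check expression = check_alt expression
  unfold check check_alt
  simp only [pyrange_even_eq, pyrange_odd_eq]
  set l := expression.toList.filter (fun x => x == '(' || x == ')') with hl
  have hb : ∀ c ∈ l, c = '(' ∨ c = ')' := by
    intro c hc
    rw [hl] at hc
    have := List.of_mem_filter hc
    simpa using this
  have key := cond_iff_tmpl l hb
  by_cases h : l = tmpl (l.length / 2)
  · have hc := key.mpr h
    simp only [tmpl] at h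
    rw [if_pos hc.1, if_pos ⟨hc.2.1, hc.2.2⟩, if_pos h]
  · simp only [tmpl] at h
    rw [if_neg h]
    by_cases h1 : (evenIdx l).length = (oddIdx l).length
    · rw [if_pos h1]
      rw [if_neg]
      intro hmem
      exact h (by simpa [tmpl] using key.mp ⟨h1, hmem.1, hmem.2⟩)
    · rw [if_neg h1]
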